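-- pv_equiv track=rewrite | github.com/TP2512/AIMLNetwork | InfrastructureSVG/Projects/FiveG/CoreCare/GenerateBT/generate_bt_v1.3.py | build_back_trace
-- ===== SOURCE A (Python) =====
-- def build_back_trace(bt_list):
--     """ Build "Back Trace" from core file """
--
--     bt = ''
--
--     flag = False
--     list_ignore = ['/usr/']
--     for row in bt_list:
--         # if '/usr/' in row[0] or '' == row[0]:
--         if any([True if i in row else False for i in list_ignore]) or row == '':
--             if flag:
--                 continue
--             else:
--                 flag = True
--                 bt = ''
--         elif 'WORKER_THREAD' in row.upper() or 'THREAD_START' in row.upper():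
--             break
--         else:
--             bt += f' -> {row}'
--
--     return bt[4:]
-- ===== SOURCE B (Python) =====
-- def build_back_trace(bt_list):
--     """ Build "Back Trace" from core file """
--
--     def is_ignore(row):
--         return '/usr/' in row or row == ''
--
--     def is_stop(row):
--         u = row.upper()
--         return 'WORKER_THREAD' in u or 'THREAD_START' in u
--
--     # rows up to (not including) the first non-ignore row that names a thread marker
--     end = next((i for i, r in enumerate(bt_list) if not is_ignore(r) and is_stop(r)),
--                len(bt_list))
--     trunc = bt_list[:end]
--     # the first ignore row resets the accumulation; later ignore rows are skipped
--     first_ig = next((i for i, r in enumerate(trunc) if is_ignore(r)), -1)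
--     kept = [r for r in trunc[first_ig + 1:] if not is_ignore(r)]
--     return ' -> '.join(kept)
-- ===== Notes on version B (the rewrite author's own statement) =====
-- stated objective: alternative
-- what changed: A's single loop with a mutable accumulator, a one-shot reset flag and a break is replaced by computing the stop index and the first-ignore index up front, then joining the filtered slice between them.
import Mathlib
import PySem

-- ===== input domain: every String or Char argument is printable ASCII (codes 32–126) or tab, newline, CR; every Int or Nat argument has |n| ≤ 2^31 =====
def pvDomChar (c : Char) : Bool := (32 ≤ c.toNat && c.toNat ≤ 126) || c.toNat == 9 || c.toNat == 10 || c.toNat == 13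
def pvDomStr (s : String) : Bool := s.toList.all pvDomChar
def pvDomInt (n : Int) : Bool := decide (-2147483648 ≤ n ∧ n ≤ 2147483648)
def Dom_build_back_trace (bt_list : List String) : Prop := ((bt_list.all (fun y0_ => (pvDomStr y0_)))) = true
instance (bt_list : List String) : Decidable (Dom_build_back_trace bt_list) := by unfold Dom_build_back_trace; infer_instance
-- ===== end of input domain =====

-- B replaces A's one-shot reset flag and mutable accumulator by computing the stop index and the
-- first-ignore index up front and joining a filtered slice (different decomposition, same cost).

-- ===== PORT A =====
-- the loop: state (bt, flag); 'break' returns bt immediately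
def pvLoopA : List String → String → Bool → String
  | [], bt, _ => bt
  | row :: rest, bt, flag =>
    if (["/usr/"] : List String).any (fun i => if PySem.Str.isIn i row then true else false) || row == "" then
      (if flag then pvLoopA rest bt flag else pvLoopA rest "" true)
    else if PySem.Str.isIn "WORKER_THREAD" (PySem.Str.upper row) || PySem.Str.isIn "THREAD_START" (PySem.Str.upper row) then
      bt
    else
      pvLoopA rest (bt ++ " -> " ++ row) flag

def build_back_trace (bt_list : List String) : String :=
  PySem.Str.slice (pvLoopA bt_list "" false) (some 4) none

-- ===== PORT B =====
def pvIsIgnore (row : String) : Bool := PySem.Str.isIn "/usr/" row || row == ""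

def pvIsStop (row : String) : Bool :=
  let u := PySem.Str.upper row
  PySem.Str.isIn "WORKER_THREAD" u || PySem.Str.isIn "THREAD_START" u

def build_back_trace_alt (bt_list : List String) : String :=
  let e : Nat := (bt_list.findIdx? (fun r => !pvIsIgnore r && pvIsStop r)).getD bt_list.length
  let trunc : List String := PySem.List.slice bt_list none (some (e : Int))
  let first_ig : Int := match trunc.findIdx? pvIsIgnore with | some i => (i : Int) | none => -1
  let kept : List String := (PySem.List.slice trunc (some (first_ig + 1)) none).filter (fun r => !pvIsIgnore r)
  PySem.Str.join " -> " kept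

-- ===== PRECONDITION & SPEC =====
def Spec_build_back_trace (bt_list : List String) (out : String) : Prop := out = build_back_trace_alt bt_list
instance (bt_list : List String) (out : String) : Decidable (Spec_build_back_trace bt_list out) := by unfold Spec_build_back_trace; infer_instance

-- ===== CLAIM (what is proved, stated in full; the proofs are below) =====
def Claim_equal_build_back_trace : Prop := ∀ (bt_list : List String), Dom_build_back_trace bt_list → Spec_build_back_trace bt_list (build_back_trace bt_list)

-- ===== LEMMAS AND PROOFS =====

-- rows kept once the flag is set: skip ignores, stop at the first non-ignore thread marker
def pvSel : List String → List String
  | [] => []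
  | r :: rest => if pvIsIgnore r then pvSel rest else if pvIsStop r then [] else r :: pvSel rest

-- some xs ⇔ a reset happens (first ignore before the first stop); xs = rows kept after it
def pvHSel : List String → Option (List String)
  | [] => none
  | r :: rest => if pvIsIgnore r then some (pvSel rest) else if pvIsStop r then none else pvHSel rest

def pvPreJoin : List String → String
  | [] => ""
  | r :: rest => " -> " ++ r ++ pvPreJoin rest

def pvEIdx (l : List String) : Nat :=
  (l.findIdx? (fun r => !pvIsIgnore r && pvIsStop r)).getD l.length

theorem pvIg_expr_eq (row : String) :
    ((["/usr/"] : List String).any (fun i => if PySem.Str.isIn i row then true else false) || row == "")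
      = pvIsIgnore row := by
  simp [pvIsIgnore, List.any]

theorem pvLoopA_true (l : List String) : ∀ bt, pvLoopA l bt true = bt ++ pvPreJoin (pvSel l) := by
  induction l with
  | nil => intro bt; simp [pvLoopA, pvPreJoin, pvSel, String.append_empty]
  | cons r rest ih =>
    intro bt
    rw [pvLoopA, pvIg_expr_eq]
    by_cases hig : pvIsIgnore r
    · simp [hig, pvSel, ih]
    · by_cases hst : pvIsStop r
      · have hst' : (PySem.Str.isIn "WORKER_THREAD" (PySem.Str.upper r) || PySem.Str.isIn "THREAD_START" (PySem.Str.upper r)) = true := by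
          simpa [pvIsStop] using hst
        rw [if_neg (by simp [hig]), if_pos hst']
        simp [pvSel, hig, hst, pvPreJoin, String.append_empty]
      · have hst' : ¬ (PySem.Str.isIn "WORKER_THREAD" (PySem.Str.upper r) || PySem.Str.isIn "THREAD_START" (PySem.Str.upper r)) = true := by
          simpa [pvIsStop] using hst
        rw [if_neg (by simp [hig]), if_neg hst']
        simp [pvSel, hig, hst, pvPreJoin, ih, String.append_assoc]

theorem pvLoopA_false (l : List String) : ∀ bt,
    pvLoopA l bt false = (match pvHSel l with
      | some xs => pvPreJoin xs
      | none => bt ++ pvPreJoin (pvSel l)) := by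
  induction l with
  | nil => intro bt; simp [pvLoopA, pvHSel, pvSel, pvPreJoin, String.append_empty]
  | cons r rest ih =>
    intro bt
    rw [pvLoopA, pvIg_expr_eq]
    by_cases hig : pvIsIgnore r
    · simp [hig, pvHSel, pvLoopA_true]
    · by_cases hst : pvIsStop r
      · have hst' : (PySem.Str.isIn "WORKER_THREAD" (PySem.Str.upper r) || PySem.Str.isIn "THREAD_START" (PySem.Str.upper r)) = true := by
          simpa [pvIsStop] using hst
        rw [if_neg (by simp [hig]), if_pos hst']
        simp [pvHSel, hig, hst, pvSel, pvPreJoin, String.append_empty]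
      · have hst' : ¬ (PySem.Str.isIn "WORKER_THREAD" (PySem.Str.upper r) || PySem.Str.isIn "THREAD_START" (PySem.Str.upper r)) = true := by
          simpa [pvIsStop] using hst
        rw [if_neg (by simp [hig]), if_neg hst']
        rw [ih]
        cases h : pvHSel rest with
        | some xs => simp [pvHSel, hig, hst, h]
        | none => simp [pvHSel, hig, hst, h, pvSel, pvPreJoin, String.append_assoc]

-- eIdx of a cons when the head is not a stop row
theorem pvEIdx_cons_not_stop (r : String) (rest : List String)
    (h : (!pvIsIgnore r && pvIsStop r) = false) :
    pvEIdx (r :: rest) = pvEIdx rest + 1 := by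
  unfold pvEIdx
  rw [List.findIdx?_cons, h]
  cases hf : rest.findIdx? (fun r => !pvIsIgnore r && pvIsStop r) with
  | some k => rfl
  | none => simp [List.length_cons]

theorem pvEIdx_cons_stop (r : String) (rest : List String)
    (h : (!pvIsIgnore r && pvIsStop r) = true) : pvEIdx (r :: rest) = 0 := by
  unfold pvEIdx
  rw [List.findIdx?_cons, h]
  rfl

theorem pvS1 (l : List String) : pvSel l = (l.take (pvEIdx l)).filter (fun r => !pvIsIgnore r) := by
  induction l with
  | nil => simp [pvSel]
  | cons r rest ih =>
    by_cases hig : pvIsIgnore r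
    · have h : (!pvIsIgnore r && pvIsStop r) = false := by simp [hig]
      rw [pvEIdx_cons_not_stop r rest h]
      simp [pvSel, hig, ih]
    · by_cases hst : pvIsStop r
      · have h : (!pvIsIgnore r && pvIsStop r) = true := by simp [hig, hst]
        rw [pvEIdx_cons_stop r rest h]
        simp [pvSel, hig, hst]
      · have h : (!pvIsIgnore r && pvIsStop r) = false := by simp [hst]
        rw [pvEIdx_cons_not_stop r rest h]
        simp [pvSel, hig, hst, ih]

theorem pvH0 (l : List String)
    (h : ∀ x ∈ l.take (pvEIdx l), pvIsIgnore x = false) : pvHSel l = none := by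
  induction l with
  | nil => rfl
  | cons r rest ih =>
    by_cases hig : pvIsIgnore r
    · have hstop : (!pvIsIgnore r && pvIsStop r) = false := by simp [hig]
      rw [pvEIdx_cons_not_stop r rest hstop] at h
      have := h r (by simp)
      simp [hig] at this
    · by_cases hst : pvIsStop r
      · simp [pvHSel, hig, hst]
      · have hstop : (!pvIsIgnore r && pvIsStop r) = false := by simp [hst]
        rw [pvEIdx_cons_not_stop r rest hstop] at h
        have : ∀ x ∈ rest.take (pvEIdx rest), pvIsIgnore x = false := by
          intro x hx; exact h x (by simp [hx])
        simp [pvHSel, hig, hst, ih this]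

theorem pvH1 (l : List String) : ∀ k,
    (l.take (pvEIdx l)).findIdx? pvIsIgnore = some k →
    pvHSel l = some (pvSel (l.drop (k + 1))) := by
  induction l with
  | nil => intro k h; simp at h
  | cons r rest ih =>
    intro k h
    by_cases hig : pvIsIgnore r
    · have hstop : (!pvIsIgnore r && pvIsStop r) = false := by simp [hig]
      rw [pvEIdx_cons_not_stop r rest hstop] at h
      rw [List.take_succ_cons, List.findIdx?_cons, hig] at h
      have hk : k = 0 := by simpa using h.symm
      subst hk
      simp [pvHSel, hig]
    · by_cases hst : pvIsStop r
      · have hstop : (!pvIsIgnore r && pvIsStop r) = true := by simp [hig, hst]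
        rw [pvEIdx_cons_stop r rest hstop] at h
        simp at h
      · have hstop : (!pvIsIgnore r && pvIsStop r) = false := by simp [hst]
        rw [pvEIdx_cons_not_stop r rest hstop] at h
        rw [List.take_succ_cons, List.findIdx?_cons] at h
        simp only [hig, Bool.false_eq_true, if_false] at h
        cases hk : (rest.take (pvEIdx rest)).findIdx? pvIsIgnore with
        | none => rw [hk] at h; simp at h
        | some k' =>
          rw [hk] at h
          simp at h
          have hkk : k = k' + 1 := by omega
          subst hkk
          have := ih k' hk
          simp [pvHSel, hig, hst, this]

theorem pvEIdx_drop (m : Nat) : ∀ (l : List String), m ≤ pvEIdx l →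
    pvEIdx (l.drop m) = pvEIdx l - m := by
  induction m with
  | zero => intro l _; simp
  | succ n ih =>
    intro l hm
    cases l with
    | nil => simp [pvEIdx] at *
    | cons r rest =>
      have hstop : (!pvIsIgnore r && pvIsStop r) = false := by
        by_contra hc
        have : (!pvIsIgnore r && pvIsStop r) = true := by
          cases h : (!pvIsIgnore r && pvIsStop r) <;> simp_all
        rw [pvEIdx_cons_stop r rest this] at hm; omega
      rw [pvEIdx_cons_not_stop r rest hstop] at hm ⊢
      rw [List.drop_succ_cons]
      rw [ih rest (by omega)]
      omega

-- toList of the prefixed concatenation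
theorem pvPreJoin_toList (xs : List String) :
    (pvPreJoin xs).toList = if xs = [] then [] else (" -> ").toList ++ (PySem.Str.join " -> " xs).toList := by
  induction xs with
  | nil => simp [pvPreJoin]
  | cons r rest ih =>
    rw [show pvPreJoin (r :: rest) = " -> " ++ r ++ pvPreJoin rest from rfl]
    rw [String.toList_append, String.toList_append, ih]
    rw [if_neg (List.cons_ne_nil r rest), PySem.Str.toList_join]
    cases rest with
    | nil =>
      rw [PySem.Str.toList_join, List.map_cons, List.map_nil, PySem.Chars.join_singleton]
      simp
    | cons r2 rest2 =>
      rw [if_neg (List.cons_ne_nil r2 rest2), PySem.Str.toList_join]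
      rw [show List.map String.toList (r :: r2 :: rest2) = r.toList :: r2.toList :: List.map String.toList rest2 from rfl]
      rw [PySem.Chars.join_cons_cons]
      simp [List.append_assoc]

theorem pvDrop4_preJoin (xs : List String) :
    List.drop 4 (pvPreJoin xs).toList = (PySem.Str.join " -> " xs).toList := by
  rw [pvPreJoin_toList]
  cases xs with
  | nil =>
    rw [if_pos rfl, PySem.Str.toList_join, List.map_nil, PySem.Chars.join_nil]
    rfl
  | cons r rest =>
    rw [if_neg (List.cons_ne_nil r rest)]
    rw [show (" -> ").toList = [' ', '-', '>', ' '] from rfl]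
    rfl

-- the list B joins
def pvKept (l : List String) : List String :=
  let e := pvEIdx l
  let trunc := l.take e
  match trunc.findIdx? pvIsIgnore with
  | some k => (trunc.drop (k + 1)).filter (fun r => !pvIsIgnore r)
  | none => trunc.filter (fun r => !pvIsIgnore r)

theorem pvAlt_eq_join_kept (l : List String) :
    build_back_trace_alt l = PySem.Str.join " -> " (pvKept l) := by
  simp only [build_back_trace_alt, pvKept]
  rw [show ((List.findIdx? (fun r => !pvIsIgnore r && pvIsStop r) l).getD l.length) = pvEIdx l from rfl]
  rw [PySem.List.slice_to l (Int.natCast_nonneg _), Int.toNat_natCast]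
  cases hk : (l.take (pvEIdx l)).findIdx? pvIsIgnore with
  | some k =>
    rw [show ((k : Int) + 1) = (((k + 1 : Nat) : Nat) : Int) by push_cast; ring]
    rw [PySem.List.slice_from _ (Int.natCast_nonneg _), Int.toNat_natCast]
  | none =>
    rw [show ((-1 : Int) + 1) = (((0 : Nat) : Nat) : Int) by ring]
    rw [PySem.List.slice_from _ (Int.natCast_nonneg _), Int.toNat_natCast, List.drop_zero]

theorem pvMain (l : List String) :
    (match pvHSel l with | some xs => xs | none => pvSel l) = pvKept l := by
  unfold pvKept
  cases hk : (l.take (pvEIdx l)).findIdx? pvIsIgnore with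
  | none =>
    have h0 := pvH0 l (by
      intro x hx
      have := List.findIdx?_eq_none_iff.mp hk
      simpa using this x hx)
    simp only [h0, pvS1 l]
    rw [hk]
  | some k =>
    have h1 := pvH1 l k hk
    simp only [h1]
    have hklt : k < (l.take (pvEIdx l)).length := by
      have := List.findIdx?_eq_some_iff_findIdx_eq.mp hk
      omega
    have hke : k + 1 ≤ pvEIdx l := by
      have : (l.take (pvEIdx l)).length ≤ pvEIdx l := by simp
      omega
    rw [pvS1 (l.drop (k+1))]
    rw [pvEIdx_drop (k+1) l hke]
    rw [← List.drop_take, hk]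

-- ===== VERDICT (by name: the statement is the Claim_ definition above) =====
theorem build_back_trace_spec : Claim_equal_build_back_trace := by
  intro l _
  unfold Spec_build_back_trace
  apply String.toList_inj.mp
  have hsl : ∀ s : String, (PySem.Str.slice s (some 4) none).toList = List.drop 4 s.toList := by
    intro s
    simp only [PySem.Str.toList_slice, PySem.Chars.slice_eq_listSlice]
    rw [PySem.List.slice_from _ (by norm_num : (0:Int) ≤ 4)]
    rfl
  unfold build_back_trace
  rw [pvLoopA_false l ""]
  rw [pvAlt_eq_join_kept, ← pvMain]
  cases h : pvHSel l with
  | some xs =>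
    rw [hsl, pvDrop4_preJoin]
  | none =>
    rw [String.empty_append, hsl, pvDrop4_preJoin]
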